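-- pv_equiv track=rewrite | github.com/AnhellO/DAS_Sistemas | Ene-Jun-2022/andrea-horizel-garcia-fuentes/Practica-2/Capitulo-8/cambiosmagos.py | make_great
-- ===== SOURCE A (Python) =====
-- def make_great(magos):
--     great_magos = []
--
--     while magos:
--         mago= magos.pop()
--         great_mago = mago + ' the grate'
--         great_magos.append(great_mago)
--
--     for great_mago in great_magos:
--         magos.append(great_mago)
--
--     return magos
-- ===== SOURCE B (Python) =====
-- def make_great(magos):
--     magos[:] = [mago + ' the grate' for mago in reversed(magos)]
--     return magos
-- ===== Notes on version B (the rewrite author's own statement) =====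
-- stated objective: idiomatic
-- what changed: Replaces the pop-into-a-new-list-then-append-back loop pair with one in-place slice assignment of a comprehension over reversed(magos).
import Mathlib
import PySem

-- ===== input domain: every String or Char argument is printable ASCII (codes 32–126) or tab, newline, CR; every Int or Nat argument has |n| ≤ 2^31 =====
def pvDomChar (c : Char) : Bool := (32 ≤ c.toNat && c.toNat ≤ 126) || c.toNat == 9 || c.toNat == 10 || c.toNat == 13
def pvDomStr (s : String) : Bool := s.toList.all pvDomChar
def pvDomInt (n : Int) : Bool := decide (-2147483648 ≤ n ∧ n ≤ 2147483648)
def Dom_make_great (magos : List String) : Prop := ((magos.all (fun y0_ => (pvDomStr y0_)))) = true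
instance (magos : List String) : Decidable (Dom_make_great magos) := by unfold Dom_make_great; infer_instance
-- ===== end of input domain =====

-- B replaces A's pop-everything-then-append-back loops with one in-place slice assignment of
-- a comprehension over reversed(magos); both mutate magos in place and return the same object.

set_option maxRecDepth 4000


-- ===== PORT A =====
-- the 'while magos:' loop: pop() takes the LAST element; acc is great_magos
def make_great_loop (ms acc : List String) : List String :=
  match h : ms with
  | [] => acc
  | _ :: _ =>
      make_great_loop ms.dropLast (acc ++ [ms.getLast (by simp [h]) ++ " the grate"])
termination_by ms.length
decreasing_by simp [h, List.length_dropLast]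

-- after the while loop magos is empty; the for loop appends every great_mago back, so the
-- returned (and final) magos is exactly great_magos
def make_great (magos : List String) : List String :=
  make_great_loop magos []

-- ===== PORT B =====
-- magos[:] = [mago + ' the grate' for mago in reversed(magos)]; return magos
def make_great_alt (magos : List String) : List String :=
  magos.reverse.map (fun mago => mago ++ " the grate")

-- ===== PRECONDITION & SPEC =====
def Spec_make_great (magos : List String) (out : List String) : Prop := out = make_great_alt magos
instance (magos : List String) (out : List String) : Decidable (Spec_make_great magos out) := by unfold Spec_make_great; infer_instance

-- ===== CLAIM (what is proved, stated in full; the proofs are below) =====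
def Claim_equal_make_great : Prop := ∀ (magos : List String), Dom_make_great magos → Spec_make_great magos (make_great magos)

-- ===== LEMMAS AND PROOFS =====
theorem make_great_loop_eq (ms acc : List String) :
    make_great_loop ms acc = acc ++ ms.reverse.map (fun mago => mago ++ " the grate") := by
  induction hn : ms.length generalizing ms acc with
  | zero =>
      have : ms = [] := List.eq_nil_of_length_eq_zero hn
      subst this; simp [make_great_loop]
  | succ n ih =>
      rcases ms with _ | ⟨a, t⟩
      · simp at hn
      · 
          rw [make_great_loop]
          have hds : (a :: t) = (a :: t).dropLast ++ [(a :: t).getLast (by simp)] :=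
            (List.dropLast_append_getLast (by simp)).symm
          rw [ih _ _ (by simp at hn ⊢; omega)]
          conv_rhs => rw [hds]
          simp only [List.reverse_append, List.reverse_cons, List.reverse_nil,
            List.nil_append, List.map_append, List.map_cons, List.map_nil,
            List.append_assoc]

-- ===== VERDICT (by name: the statement is the Claim_ definition above) =====
theorem make_great_spec : Claim_equal_make_great := by
  intro magos _
  unfold Spec_make_great make_great make_great_alt
  simp [make_great_loop_eq]
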